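-- pv_equiv track=rewrite | github.com/filippotroiani/AoC | 2015/15.py | calculateTotScore
-- ===== SOURCE A (Python) =====
-- def calculateTotScore(ingredientsList: list, quantities = list) -> int: # given the recipe (quantities) returns the total score
--     totScore = 1
--     for propertyIndex in range(len(ingredientsList[0]) - 1):   # for every property except (calories the last one)
--         propScore = 0
--         for ingredientIndex, ingredient in enumerate(ingredientsList):
--             propScore += ingredient[propertyIndex] * quantities[ingredientIndex]
--         if propScore <= 0: return 0
--         totScore *= propScore
--     return totScore
-- ===== SOURCE B (Python) =====
-- def calculateTotScore(ingredientsList: list, quantities = list) -> int: # given the recipe (quantities) returns the total score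
--     # Ingredient-major (transposed) traversal: one pass over the ingredients, adding each
--     # quantity-weighted row into a running vector of property totals; then check and reduce.
--     nProps = max(len(ingredientsList[0]) - 1, 0)
--     totals = [0] * nProps
--     for q, row in zip(quantities, ingredientsList):
--         for p, v in enumerate(row[:nProps]):
--             totals[p] += v * q
--     if any(t <= 0 for t in totals):
--         return 0
--     product = 1
--     for t in totals:
--         product *= t
--     return product
-- ===== Notes on version B (the rewrite author's own statement) =====
-- stated objective: alternative
-- what changed: B traverses the data in the transposed, ingredient-major order: a single pass over the rows accumulates a vector of property totals by elementwise weighted row addition, then a separate check-and-product pass, instead of A's property-major nested loops that rescan all ingredients per property with an early exit.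
-- outside the precondition, e.g. on calculateTotScore([[-5, 2, 3], [1]], [1, 1]): A returns 0, B returns 0
import Mathlib
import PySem

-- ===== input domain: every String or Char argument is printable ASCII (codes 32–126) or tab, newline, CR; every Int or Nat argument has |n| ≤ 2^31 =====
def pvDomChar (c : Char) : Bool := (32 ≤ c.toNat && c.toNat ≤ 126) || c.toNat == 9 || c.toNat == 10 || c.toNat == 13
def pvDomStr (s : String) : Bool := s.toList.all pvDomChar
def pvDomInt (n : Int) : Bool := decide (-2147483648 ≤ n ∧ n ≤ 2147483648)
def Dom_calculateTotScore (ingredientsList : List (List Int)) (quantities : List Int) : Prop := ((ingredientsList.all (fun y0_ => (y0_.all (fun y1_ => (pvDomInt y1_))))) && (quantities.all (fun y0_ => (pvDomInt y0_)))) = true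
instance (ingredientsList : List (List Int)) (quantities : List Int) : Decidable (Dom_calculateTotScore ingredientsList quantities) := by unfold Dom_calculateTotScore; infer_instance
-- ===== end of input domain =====

-- B traverses the data in the transposed, ingredient-major order (one pass over the rows,
-- accumulating a vector of property totals), instead of A's property-major nested loops
-- with early exit; same asymptotic cost, different traversal.

-- ===== PORT A =====
-- inner loop: for ingredientIndex, ingredient in enumerate(ingredientsList): propScore += ingredient[p]*quantities[i]
def pvA_prop (ingredientsList : List (List Int)) (quantities : List Int) (propertyIndex : Int) : Int :=
  (PySem.List.enumerate ingredientsList 0).foldl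
    (fun propScore r =>
      propScore + (PySem.List.pyGet? r.2 propertyIndex).getD 0 * (PySem.List.pyGet? quantities r.1).getD 0) 0

-- outer loop with the early 'return 0'
def pvA_loop (ingredientsList : List (List Int)) (quantities : List Int) (props : List Int) (totScore : Int) : Int :=
  match props with
  | [] => totScore
  | p :: rest =>
    let propScore := pvA_prop ingredientsList quantities p
    if propScore ≤ 0 then 0
    else pvA_loop ingredientsList quantities rest (totScore * propScore)

def calculateTotScore (ingredientsList : List (List Int)) (quantities : List Int) : Int :=
  pvA_loop ingredientsList quantities
    (PySem.List.pyRange 0 (((ingredientsList.headD []).length : Int) - 1) 1) 1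

-- ===== PORT B =====
-- inner loop 'for p, v in enumerate(row[:nProps]): totals[p] += v * q':
-- elementwise add of the (truncated) weighted row into the totals vector; since
-- len(row[:nProps]) ≤ len(totals), the positional updates are exactly this recursion.
def pvB_addRow (totals vals : List Int) (q : Int) : List Int :=
  match totals, vals with
  | ts, [] => ts
  | [], _ => []
  | t :: ts, v :: vs => (t + v * q) :: pvB_addRow ts vs q

-- nProps = max(len(ingredientsList[0]) - 1, 0): Nat truncated subtraction is exactly that max
def pvB_nProps (ingredientsList : List (List Int)) : Nat := (ingredientsList.headD []).length - 1

-- totals = the accumulation loop 'for q, row in zip(quantities, ingredientsList): ...'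
def pvB_totals (ingredientsList : List (List Int)) (quantities : List Int) : List Int :=
  (quantities.zip ingredientsList).foldl
    (fun ts qr => pvB_addRow ts (qr.2.take (pvB_nProps ingredientsList)) qr.1)
    (List.replicate (pvB_nProps ingredientsList) 0)

def calculateTotScore_alt (ingredientsList : List (List Int)) (quantities : List Int) : Int :=
  if (pvB_totals ingredientsList quantities).any (fun t => decide (t ≤ 0)) then 0
  else (pvB_totals ingredientsList quantities).foldl (fun r t => r * t) 1

-- ===== PRECONDITION & SPEC =====
-- Pre_ excludes the inputs where Python A raises IndexError (empty ingredient list, fewer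
-- quantities than ingredients, a row shorter than len(row0)-1); because A's early exit makes
-- its exact raise set not closed-form, Pre_ conservatively also excludes ragged/short inputs
-- on which A's early exit still returns 0 — B returns the same 0 on those (see cites).
def Pre_calculateTotScore (ingredientsList : List (List Int)) (quantities : List Int) : Prop :=
  ingredientsList ≠ [] ∧
    (2 ≤ (ingredientsList.headD []).length → ingredientsList.length ≤ quantities.length) ∧
    ∀ row ∈ ingredientsList, (ingredientsList.headD []).length - 1 ≤ row.length
instance (ingredientsList : List (List Int)) (quantities : List Int) : Decidable (Pre_calculateTotScore ingredientsList quantities) := by unfold Pre_calculateTotScore; infer_instance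

def pvWitness_calculateTotScore : List (List Int) × List Int := ([[1, 2], [3, 4]], [1, 1])

def Spec_calculateTotScore (ingredientsList : List (List Int)) (quantities : List Int) (out : Int) : Prop := out = calculateTotScore_alt ingredientsList quantities
instance (ingredientsList : List (List Int)) (quantities : List Int) (out : Int) : Decidable (Spec_calculateTotScore ingredientsList quantities out) := by unfold Spec_calculateTotScore; infer_instance

-- ===== CLAIM (what is proved, stated in full; the proofs are below) =====
def Claim_equal_calculateTotScore : Prop := ∀ (ingredientsList : List (List Int)) (quantities : List Int), Dom_calculateTotScore ingredientsList quantities → Pre_calculateTotScore ingredientsList quantities → Spec_calculateTotScore ingredientsList quantities (calculateTotScore ingredientsList quantities)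

-- ===== LEMMAS AND PROOFS =====

-- column total of property p over the zipped (quantity, row) pairs
def pvColSum (l : List (Int × List Int)) (p : Int) : Int :=
  l.foldl (fun s qr => s + (PySem.List.pyGet? qr.2 p).getD 0 * qr.1) 0

theorem pvColSum_cons (x : Int × List Int) (l : List (Int × List Int)) (p : Int) :
    pvColSum (x :: l) p = (PySem.List.pyGet? x.2 p).getD 0 * x.1 + pvColSum l p := by
  unfold pvColSum
  simp only [List.foldl_cons]
  rw [PySem.List.foldl_add, PySem.List.foldl_add]
  ring

-- A's enumerate-and-index inner loop equals the column total over zip(quantities, rows).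
theorem pv_inner_aux (p : Int) :
    ∀ (ing : List (List Int)) (pre suf : List Int) (acc : Int),
      ing.length ≤ suf.length →
      (PySem.List.enumerate ing (pre.length : Int)).foldl
          (fun a r => a + (PySem.List.pyGet? r.2 p).getD 0 * (PySem.List.pyGet? (pre ++ suf) r.1).getD 0) acc
        = (suf.zip ing).foldl (fun s qr => s + (PySem.List.pyGet? qr.2 p).getD 0 * qr.1) acc := by
  intro ing
  induction ing with
  | nil => intro pre suf acc _; simp [PySem.List.enumerate_nil]
  | cons row rest ih =>
    intro pre suf acc hlen
    cases suf with
    | nil => simp at hlen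
    | cons x suf' =>
      rw [PySem.List.enumerate_cons]
      simp only [List.foldl_cons, List.zip_cons_cons]
      rw [PySem.List.pyGet?_append_length]
      have h1 : ((pre.length : Int) + 1) = (((pre ++ [x]).length : Int)) := by simp
      have h2 : pre ++ x :: suf' = (pre ++ [x]) ++ suf' := by simp
      rw [h1, h2]
      exact ih (pre ++ [x]) suf' _ (by simpa using Nat.le_of_succ_le_succ (by simpa using hlen))

theorem pv_prop_eq (ing : List (List Int)) (q : List Int) (p : Int)
    (h : ing.length ≤ q.length) : pvA_prop ing q p = pvColSum (q.zip ing) p := by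
  unfold pvA_prop pvColSum
  have := pv_inner_aux p ing [] q 0 h
  simpa using this

-- B's positional inner loop is an elementwise weighted add on the range-indexed table.
theorem pv_addRow_map_range :
    ∀ (n : Nat) (f : Nat → Int) (row : List Int) (q : Int), n ≤ row.length →
      pvB_addRow ((List.range n).map f) (row.take n) q
        = (List.range n).map (fun p => f p + (PySem.List.pyGet? row (p : Int)).getD 0 * q) := by
  intro n
  induction n with
  | zero => intro f row q _; simp [pvB_addRow]
  | succ m ih =>
    intro f row q h
    cases row with
    | nil => simp at h
    | cons v vs =>
      rw [List.range_succ_eq_map]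
      simp only [List.map_cons, List.map_map, List.take_succ_cons, pvB_addRow]
      congr 1
      · simp
      · rw [ih (f ∘ Nat.succ) vs q (by simpa using h)]
        apply List.map_congr_left
        intro k _
        simp [Function.comp, PySem.List.pyGet?_natCast]

-- the whole ingredient-major fold computes the table of column totals
theorem pv_fold_addRow (n : Nat) :
    ∀ (l : List (Int × List Int)) (f : Nat → Int), (∀ qr ∈ l, n ≤ qr.2.length) →
      l.foldl (fun ts qr => pvB_addRow ts (qr.2.take n) qr.1) ((List.range n).map f)
        = (List.range n).map (fun p => f p + pvColSum l (p : Int)) := by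
  intro l
  induction l with
  | nil => intro f _; simp [pvColSum]
  | cons qr rest ih =>
    intro f hlen
    simp only [List.foldl_cons]
    rw [pv_addRow_map_range n f qr.2 qr.1 (hlen qr (by simp))]
    rw [ih _ (fun x hx => hlen x (by simp [hx]))]
    apply List.map_congr_left
    intro k _
    rw [pvColSum_cons]
    ring

-- A's fused product loop with early exit equals check-then-reduce on the totals table.
theorem pv_loop_eq (ing : List (List Int)) (q : List Int) :
    ∀ (props : List Int) (acc : Int),
      pvA_loop ing q props acc =
        if (props.map (pvA_prop ing q)).any (fun t => decide (t ≤ 0)) then 0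
        else (props.map (pvA_prop ing q)).foldl (fun r t => r * t) acc := by
  intro props
  induction props with
  | nil => intro acc; simp [pvA_loop]
  | cons p rest ih =>
    intro acc
    rw [pvA_loop]
    simp only [List.map_cons, List.any_cons, List.foldl_cons]
    by_cases hle : pvA_prop ing q p ≤ 0
    · simp [hle]
    · simp only [hle, decide_false, Bool.false_or]
      exact ih (acc * pvA_prop ing q p)

-- in the degenerate nProps = 0 case B's accumulator stays []
theorem pvB_addRow_nil_vals (ts : List Int) (q : Int) : pvB_addRow ts [] q = ts := by
  cases ts <;> rfl

theorem pv_totals_zero (ing : List (List Int)) (q : List Int) (h0 : pvB_nProps ing = 0) :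
    pvB_totals ing q = [] := by
  unfold pvB_totals
  rw [h0]
  simp only [List.take_zero, pvB_addRow_nil_vals, List.replicate_zero]
  induction q.zip ing with
  | nil => rfl
  | cons x l ih => simp [ih]

-- ===== VERDICT (by name: the statement is the Claim_ definition above) =====
theorem calculateTotScore_spec : Claim_equal_calculateTotScore := by
  intro ing q _ hpre
  obtain ⟨hne, hq, hrow⟩ := hpre
  unfold Spec_calculateTotScore calculateTotScore calculateTotScore_alt
  by_cases h2 : 2 ≤ (ing.headD []).length
  · -- main case: the range is nonempty and every index is in range
    have hcast : ((ing.headD []).length : Int) - 1 = (((ing.headD []).length - 1 : Nat) : Int) := by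
      omega
    have hrange : PySem.List.pyRange 0 ((((ing.headD []).length - 1 : Nat) : Int)) 1
        = (List.range ((ing.headD []).length - 1)).map (fun (k : Nat) => (k : Int)) := by
      rw [PySem.List.pyRange_one]
      have : ((((ing.headD []).length - 1 : Nat) : Int) - 0).toNat = (ing.headD []).length - 1 := by
        omega
      rw [this]
      apply List.map_congr_left
      intro k _
      rw [zero_add]
    have htot : pvB_totals ing q
        = (List.range ((ing.headD []).length - 1)).map
            (fun (p : Nat) => pvColSum (q.zip ing) (p : Int)) := by
      unfold pvB_totals pvB_nProps
      have hrep : (List.replicate ((ing.headD []).length - 1) (0 : Int))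
          = (List.range ((ing.headD []).length - 1)).map (fun _ => 0) := by
        simp
      rw [hrep, pv_fold_addRow _ _ (fun _ => 0)]
      · simp
      · intro qr hqr
        exact hrow qr.2 (List.of_mem_zip hqr).2
    rw [hcast, hrange, pv_loop_eq, htot]
    have hmap : (((List.range ((ing.headD []).length - 1)).map (fun (k : Nat) => (k : Int))).map (pvA_prop ing q))
        = (List.range ((ing.headD []).length - 1)).map (fun (p : Nat) => pvColSum (q.zip ing) (p : Int)) := by
      rw [List.map_map]
      apply List.map_congr_left
      intro k _
      exact pv_prop_eq ing q (k : Int) (hq h2)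
    rw [hmap]
  · -- degenerate case: at most one column, so no properties at all; both return 1
    have h0 : pvB_nProps ing = 0 := by unfold pvB_nProps; omega
    rw [PySem.List.pyRange_one_eq_nil (by omega), pv_totals_zero ing q h0]
    simp [pvA_loop]
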